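-- pv_equiv track=rewrite | github.com/ant-le/causal_discovery | src/causal_meta/analysis/utils.py | _infer_model_key
-- ===== SOURCE A (Python) =====
-- MODEL_NAME_MAP: dict[str, str] = {
--     "avici": "AviCi",
--     "avici_smoke": "AviCi",
--     "avici_full": "AviCi",
--     "bcnp": "BCNP",
--     "bcnp_smoke": "BCNP",
--     "bcnp_full": "BCNP",
--     "dibs": "DiBS",
--     "random": "Random",
--     "random_smoke": "Random",
--     "bayesdag": "BayesDAG",
-- }
--
-- def _infer_model_key(run_id: str) -> str:
--     run_id_norm = run_id.lower()
--     candidates = sorted(MODEL_NAME_MAP.keys(), key=len, reverse=True)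
--     for candidate in candidates:
--         candidate_norm = candidate.lower()
--         if (
--             run_id_norm == candidate_norm
--             or run_id_norm.endswith(f"_{candidate_norm}")
--             or f"_{candidate_norm}_" in run_id_norm
--         ):
--             return candidate
--     return run_id
-- ===== SOURCE B (Python) =====
-- MODEL_NAME_MAP: dict[str, str] = {
--     "avici": "AviCi",
--     "avici_smoke": "AviCi",
--     "avici_full": "AviCi",
--     "bcnp": "BCNP",
--     "bcnp_smoke": "BCNP",
--     "bcnp_full": "BCNP",
--     "dibs": "DiBS",
--     "random": "Random",
--     "random_smoke": "Random",
--     "bayesdag": "BayesDAG",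
-- }
--
--
-- def _has_sublist(needle, hay):
--     # contiguous sub-list test, scanning hay left to right
--     while True:
--         if hay[:len(needle)] == needle:
--             return True
--         if not hay:
--             return False
--         hay = hay[1:]
--
--
-- def _infer_model_key(run_id: str) -> str:
--     tokens = run_id.lower().split("_")
--     for candidate in sorted(MODEL_NAME_MAP, key=len, reverse=True):
--         ctoks = candidate.split("_")
--         # exact match, or candidate's tokens appear contiguously at some
--         # token index >= 1 (covers '_candidate' suffix and '_candidate_' interior,
--         # and excludes a bare prefix match, as intended)
--         if tokens == ctoks or _has_sublist(ctoks, tokens[1:]):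
--             return candidate
--     return run_id
-- ===== Notes on version B (the rewrite author's own statement) =====
-- stated objective: alternative
-- what changed: B splits the lowercased run_id on underscores once and tests each candidate's token list for exact equality or a contiguous token-sublist match starting at token index 1 or later, replacing A's three string-method tests (equality, underscore-prefixed suffix test, bracketed-substring containment) with one token-list traversal.
import Mathlib
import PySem

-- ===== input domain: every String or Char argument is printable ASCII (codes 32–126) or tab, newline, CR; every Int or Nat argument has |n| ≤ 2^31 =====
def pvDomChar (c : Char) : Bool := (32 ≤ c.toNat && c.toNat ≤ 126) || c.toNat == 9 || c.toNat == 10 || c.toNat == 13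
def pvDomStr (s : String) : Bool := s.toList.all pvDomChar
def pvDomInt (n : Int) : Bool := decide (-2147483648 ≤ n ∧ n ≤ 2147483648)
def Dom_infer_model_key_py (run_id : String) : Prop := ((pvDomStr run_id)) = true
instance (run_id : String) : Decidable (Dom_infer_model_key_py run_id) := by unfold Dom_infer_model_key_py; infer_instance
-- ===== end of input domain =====

-- B replaces A's three string-method tests (equality / endswith / substring) by one
-- token-list test on run_id.lower().split("_"); same cost class, objective: alternative.

-- shared module-level constant MODEL_NAME_MAP
def pvMap : PySem.Dict String String := PySem.Dict.ofList
  [("avici","AviCi"),("avici_smoke","AviCi"),("avici_full","AviCi"),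
   ("bcnp","BCNP"),("bcnp_smoke","BCNP"),("bcnp_full","BCNP"),
   ("dibs","DiBS"),("random","Random"),("random_smoke","Random"),
   ("bayesdag","BayesDAG")]

-- ===== PORT A =====
-- the three-way test of A's if, on code-point lists
def pvCondA (rn cn : List Char) : Bool :=
  rn == cn || PySem.Chars.endswith rn ('_' :: cn) || PySem.Chars.isIn ('_' :: (cn ++ ['_'])) rn

def pvLoopA (run_id : String) (rn : List Char) : List String → String
  | [] => run_id
  | c :: rest =>
    if pvCondA rn (PySem.Chars.lower c.toList) then c else pvLoopA run_id rn rest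

def infer_model_key_py (run_id : String) : String :=
  pvLoopA run_id (PySem.Chars.lower run_id.toList)
    (PySem.List.sorted pvMap.keys (fun k => PySem.Str.len k) true)

-- ===== PORT B =====
-- _has_sublist: needle is a contiguous sub-list of hay (left-to-right scan)
def pvHasSublist (needle : List (List Char)) : List (List Char) → Bool
  | [] => needle.isPrefixOf []
  | x :: r => if needle.isPrefixOf (x :: r) then true else pvHasSublist needle r

def pvLoopB (run_id : String) (toks : List (List Char)) : List String → String
  | [] => run_id
  | c :: rest =>
    let ct := List.splitOn '_' c.toList
    if toks == ct || pvHasSublist ct (toks.drop 1) then c else pvLoopB run_id toks rest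

def infer_model_key_py_alt (run_id : String) : String :=
  pvLoopB run_id (List.splitOn '_' (PySem.Chars.lower run_id.toList))
    (PySem.List.sorted pvMap.keys (fun k => PySem.Str.len k) true)

-- ===== PRECONDITION & SPEC =====
def Spec_infer_model_key_py (run_id : String) (out : String) : Prop := out = infer_model_key_py_alt run_id
instance (run_id : String) (out : String) : Decidable (Spec_infer_model_key_py run_id out) := by unfold Spec_infer_model_key_py; infer_instance

-- ===== CLAIM (what is proved, stated in full; the proofs are below) =====
def Claim_equal_infer_model_key_py : Prop := ∀ (run_id : String), Dom_infer_model_key_py run_id → Spec_infer_model_key_py run_id (infer_model_key_py run_id)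

-- ===== LEMMAS AND PROOFS =====

-- splitting at an explicit separator splits the two halves independently
theorem pv_splitOn_append (a b : List Char) :
    List.splitOn '_' (a ++ '_' :: b) = List.splitOn '_' a ++ List.splitOn '_' b := by
  induction a with
  | nil => simp [List.splitOn, List.splitOnP_cons]
  | cons ch a ih =>
    by_cases h : ch = '_'
    · subst h
      simp [List.splitOn, List.splitOnP_cons] at ih ⊢
      simp [ih]
    · have h1 : List.splitOnP (fun x => x == '_') (a ++ '_' :: b) ≠ [] :=
        List.splitOnP_ne_nil _ _
      simp [List.splitOn, List.splitOnP_cons, h] at ih ⊢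
      rw [ih]
      rcases hh : List.splitOnP (fun x => x == '_') a with _ | ⟨t, ts⟩
      · exact absurd hh (List.splitOnP_ne_nil _ _)
      · simp

theorem pv_splitOn_ne_nil (s : List Char) : List.splitOn '_' s ≠ [] :=
  List.splitOnP_ne_nil _ _

-- intercalate over a cons with a nonempty tail
theorem pv_inter_cons (z : List Char) (ys : List (List Char)) (hy : ys ≠ []) :
    List.intercalate ['_'] (z :: ys) = z ++ '_' :: List.intercalate ['_'] ys := by
  rcases ys with _ | ⟨y, ys⟩
  · exact absurd rfl hy
  · simp [List.intercalate]

-- intercalate over an append of two nonempty token lists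
theorem pv_inter_append (xs ys : List (List Char)) (hx : xs ≠ []) (hy : ys ≠ []) :
    List.intercalate ['_'] (xs ++ ys) =
      List.intercalate ['_'] xs ++ '_' :: List.intercalate ['_'] ys := by
  induction xs with
  | nil => exact absurd rfl hx
  | cons z xs ih =>
    rcases xs with _ | ⟨w, ws⟩
    · rw [List.singleton_append, pv_inter_cons z ys hy]
      simp [List.intercalate]
    · have h1 : (w :: ws : List (List Char)) ≠ [] := by simp
      have h2 : (w :: ws ++ ys : List (List Char)) ≠ [] := by simp
      rw [List.cons_append, pv_inter_cons z _ h2, pv_inter_cons z _ h1, ih h1]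
      simp

-- pvHasSublist decides the contiguous-sub-list (infix) relation
theorem pv_hasSublist_iff (n h : List (List Char)) :
    pvHasSublist n h = true ↔ n <:+: h := by
  induction h with
  | nil =>
    simp [pvHasSublist, List.isPrefixOf_iff_prefix]
  | cons x r ih =>
    simp only [pvHasSublist]
    by_cases hp : n.isPrefixOf (x :: r)
    · simp [hp]
      exact (List.isPrefixOf_iff_prefix.mp hp).isInfix
    · simp [hp, ih, List.infix_cons_iff]
      intro hpre
      exact absurd (List.isPrefixOf_iff_prefix.mpr hpre) (by simpa using hp)

-- the heart of the equivalence: A's three-way string test equals B's token test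
theorem pv_cond_iff (s c : List Char) :
    pvCondA s c =
      (List.splitOn '_' s == List.splitOn '_' c
        || pvHasSublist (List.splitOn '_' c) ((List.splitOn '_' s).drop 1)) := by
  rw [Bool.eq_iff_iff]
  simp only [pvCondA, Bool.or_eq_true, beq_iff_eq, PySem.Chars.endswith_iff,
    PySem.Chars.isIn_iff_infix, pv_hasSublist_iff]
  constructor
  · rintro ((rfl | ⟨a, ha⟩) | ⟨a, b, hab⟩)
    · exact Or.inl rfl
    · -- s = a ++ '_' :: c  (endswith)
      refine Or.inr ?_
      rw [← ha, pv_splitOn_append]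
      rcases hh : List.splitOn '_' a with _ | ⟨t, ts⟩
      · exact absurd hh (pv_splitOn_ne_nil a)
      · exact ⟨ts, [], by simp⟩
    · -- s = a ++ ('_' :: (c ++ ['_'])) ++ b  (interior)
      refine Or.inr ?_
      have h2 : s = a ++ '_' :: (c ++ '_' :: b) := by rw [← hab]; simp
      rw [h2, pv_splitOn_append, pv_splitOn_append]
      rcases hh : List.splitOn '_' a with _ | ⟨t, ts⟩
      · exact absurd hh (pv_splitOn_ne_nil a)
      · exact ⟨ts, List.splitOn '_' b, by simp⟩
  · rintro (heq | ⟨p, q, hpq⟩)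
    · -- equal token lists ⇒ equal strings
      have := List.intercalate_splitOn s '_'
      rw [heq, List.intercalate_splitOn] at this
      exact Or.inl (Or.inl this.symm)
    · -- tokens of c occur contiguously from index ≥ 1
      rcases hh : List.splitOn '_' s with _ | ⟨t0, rest⟩
      · exact absurd hh (pv_splitOn_ne_nil s)
      · rw [hh] at hpq
        simp only [List.drop_one, List.tail_cons] at hpq
        have hs : s = List.intercalate ['_'] (t0 :: rest) := by
          have := List.intercalate_splitOn s '_'
          rw [hh] at this; exact this.symm
        have hc : List.intercalate ['_'] (List.splitOn '_' c) = c :=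
          List.intercalate_splitOn c '_'
        rcases q with _ | ⟨q0, qs⟩
        · -- candidate tokens end the token list: suffix case
          refine Or.inl (Or.inr ?_)
          have hrest : rest = p ++ List.splitOn '_' c := by simpa using hpq.symm
          have hxs : t0 :: rest = (t0 :: p) ++ List.splitOn '_' c := by simp [hrest]
          rw [hs, hxs, pv_inter_append (t0 :: p) _ (by simp) (pv_splitOn_ne_nil c), hc]
          exact ⟨List.intercalate ['_'] (t0 :: p), rfl⟩
        · -- candidate tokens sit strictly inside: interior case
          refine Or.inr ?_
          have hxs : t0 :: rest = ((t0 :: p) ++ List.splitOn '_' c) ++ (q0 :: qs) := by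
            simp [← hpq]
          rw [hs, hxs, pv_inter_append _ _ (by simp) (by simp),
            pv_inter_append (t0 :: p) _ (by simp) (pv_splitOn_ne_nil c), hc]
          exact ⟨List.intercalate ['_'] (t0 :: p), List.intercalate ['_'] (q0 :: qs), by simp⟩

-- the two candidate loops agree when every candidate is already lower-case
theorem pv_loops_eq (run_id : String) (s : List Char) (cands : List String)
    (hl : ∀ c ∈ cands, PySem.Chars.lower c.toList = c.toList) :
    pvLoopA run_id s cands = pvLoopB run_id (List.splitOn '_' s) cands := by
  induction cands with
  | nil => rfl
  | cons c rest ih =>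
    have hc := hl c (by simp)
    simp only [pvLoopA, pvLoopB, hc, pv_cond_iff]
    split
    · rfl
    · exact ih (fun c hc => hl c (by simp [hc]))

-- ===== VERDICT (by name: the statement is the Claim_ definition above) =====
theorem infer_model_key_py_spec : Claim_equal_infer_model_key_py := by
  intro run_id _
  show infer_model_key_py run_id = infer_model_key_py_alt run_id
  unfold infer_model_key_py infer_model_key_py_alt
  exact pv_loops_eq run_id _ _ (by decide)
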